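-- pv_equiv track=rewrite | github.com/LeoToledo/ITLH-Pruning | PruningMultipleStructures/output_data/plot_acc_vs_epoch.py | detect_pruning_points
-- ===== SOURCE A (Python) =====
-- def detect_pruning_points(data):
--     pruning_epochs = []
--     prev_flops = None
--
--     for i, entry in enumerate(data):
--         if prev_flops is not None and entry['flops'] < prev_flops:
--             pruning_epochs.append(i)
--         prev_flops = entry['flops']
--
--     return pruning_epochs
-- ===== SOURCE B (Python) =====
-- def detect_pruning_points(data):
--     # Recursive decomposition: solve the problem for the tail data[1:],
--     # shift those indices by +1, and prepend index 1 if the first step drops.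
--     if len(data) < 2:
--         return []
--     first = [1] if data[1]['flops'] < data[0]['flops'] else []
--     return first + [i + 1 for i in detect_pruning_points(data[1:])]
-- ===== Notes on version B (the rewrite author's own statement) =====
-- stated objective: alternative
-- what changed: Replaces A's stateful single pass (prev_flops/None sentinel, enumerate) by a recursion on the list structure: solve the tail subproblem, shift its indices by +1, and prepend index 1 when the first consecutive pair drops.
import Mathlib
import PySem

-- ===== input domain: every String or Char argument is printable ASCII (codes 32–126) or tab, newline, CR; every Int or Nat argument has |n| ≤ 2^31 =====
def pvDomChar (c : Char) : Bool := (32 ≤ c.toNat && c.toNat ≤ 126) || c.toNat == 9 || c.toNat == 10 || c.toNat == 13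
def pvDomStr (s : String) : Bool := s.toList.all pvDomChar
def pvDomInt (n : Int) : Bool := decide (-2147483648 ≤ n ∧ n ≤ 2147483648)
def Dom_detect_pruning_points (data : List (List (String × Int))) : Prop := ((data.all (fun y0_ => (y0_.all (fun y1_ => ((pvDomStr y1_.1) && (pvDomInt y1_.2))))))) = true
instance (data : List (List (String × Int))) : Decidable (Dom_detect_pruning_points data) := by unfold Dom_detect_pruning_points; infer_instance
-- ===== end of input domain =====

-- B replaces A's stateful sentinel pass by a structural recursion on the list:
-- solve the tail, shift its indices by +1, prepend 1 on a first-pair drop (objective: alternative).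
-- ===== PORT A =====
def detect_pruning_points (data : List (List (String × Int))) : List Int :=
  (data.foldl
    (fun (st : List Int × Option Int × Int) entry =>
      let f := (PySem.Dict.mk entry).getD "flops" 0
      let acc := match st.2.1 with
        | some p => if f < p then st.1 ++ [st.2.2] else st.1
        | none => st.1
      (acc, some f, st.2.2 + 1))
    ([], none, 0)).1

-- ===== PORT B =====
-- recursion on the structure: 'if len(data) < 2: return []' is the base case,
-- 'data[1:]' is the tail, and the recursive result is shifted by mapping (+1).
def detect_pruning_points_alt (data : List (List (String × Int))) : List Int :=
  match data with
  | e0 :: e1 :: rest =>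
    (if (PySem.Dict.mk e1).getD "flops" 0 < (PySem.Dict.mk e0).getD "flops" 0 then [1] else [])
      ++ (detect_pruning_points_alt (e1 :: rest)).map (fun i => i + 1)
  | _ => []

-- ===== PRECONDITION & SPEC =====
-- Pre_ excludes exactly the inputs on which A raises KeyError: some entry lacks the key 'flops'.
def Pre_detect_pruning_points (data : List (List (String × Int))) : Prop :=
  (data.all (fun entry => (PySem.Dict.mk entry).contains "flops")) = true
instance (data : List (List (String × Int))) : Decidable (Pre_detect_pruning_points data) := by
  unfold Pre_detect_pruning_points; infer_instance

def pvWitness_detect_pruning_points : (List (List (String × Int))) :=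
  [[("flops", 4)], [("flops", 2)], [("flops", 3)], [("flops", 1)]]

def Spec_detect_pruning_points (data : List (List (String × Int))) (out : List Int) : Prop := out = detect_pruning_points_alt data
instance (data : List (List (String × Int))) (out : List Int) : Decidable (Spec_detect_pruning_points data out) := by unfold Spec_detect_pruning_points; infer_instance

-- ===== CLAIM (what is proved, stated in full; the proofs are below) =====
def Claim_equal_detect_pruning_points : Prop := ∀ (data : List (List (String × Int))), Dom_detect_pruning_points data → Pre_detect_pruning_points data → Spec_detect_pruning_points data (detect_pruning_points data)

-- ===== LEMMAS AND PROOFS =====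
-- Pairwise-scan characterisation used as the bridge between the two ports.
def pvPairs (i : Int) : List Int → List Int
  | a :: b :: rest => (if b < a then [i] else []) ++ pvPairs (i + 1) (b :: rest)
  | _ => []

-- A's loop, once prev is some p at index i, produces exactly the pairwise scan of p :: remaining flops.
theorem pvFold_eq_pairs (l : List (List (String × Int))) :
    ∀ (acc : List Int) (p i : Int),
    (l.foldl
      (fun (st : List Int × Option Int × Int) entry =>
        let f := (PySem.Dict.mk entry).getD "flops" 0
        let acc := match st.2.1 with
          | some q => if f < q then st.1 ++ [st.2.2] else st.1
          | none => st.1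
        (acc, some f, st.2.2 + 1))
      (acc, some p, i)).1
    = acc ++ pvPairs i (p :: l.map (fun entry => (PySem.Dict.mk entry).getD "flops" 0)) := by
  induction l with
  | nil => intro acc p i; simp [pvPairs]
  | cons e rest ih =>
    intro acc p i
    simp only [List.foldl_cons, List.map_cons]
    rw [ih]
    by_cases h : (PySem.Dict.mk e).getD "flops" 0 < p
    · simp [pvPairs, h]
    · simp [pvPairs, h]

-- Shifting the start index of the pairwise scan shifts every reported index.
theorem pvPairs_shift (l : List Int) : ∀ (i : Int),
    pvPairs (i + 1) l = (pvPairs i l).map (fun j => j + 1) := by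
  induction l with
  | nil => intro i; simp [pvPairs]
  | cons a t ih =>
    intro i
    cases t with
    | nil => simp [pvPairs]
    | cons b rest =>
      by_cases h : b < a
      · simp [pvPairs, h, ih]
      · simp [pvPairs, h, ih]

-- B equals the pairwise scan started at index 1.
theorem pvAlt_eq_pairs (data : List (List (String × Int))) :
    detect_pruning_points_alt data
      = pvPairs 1 (data.map (fun entry => (PySem.Dict.mk entry).getD "flops" 0)) := by
  induction data with
  | nil => simp [detect_pruning_points_alt, pvPairs]
  | cons e0 rest ih =>
    cases rest with
    | nil => simp [detect_pruning_points_alt, pvPairs]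
    | cons e1 t =>
      rw [detect_pruning_points_alt, ih]
      simp only [List.map_cons]
      rw [← pvPairs_shift]
      rfl

-- ===== VERDICT (by name: the statement is the Claim_ definition above) =====
theorem detect_pruning_points_spec : Claim_equal_detect_pruning_points := by
  intro data _ _
  unfold Spec_detect_pruning_points detect_pruning_points
  rw [pvAlt_eq_pairs]
  cases data with
  | nil => rfl
  | cons e rest =>
    simp only [List.foldl_cons, List.map_cons]
    rw [pvFold_eq_pairs]
    rfl
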